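-- pv_equiv track=rewrite | github.com/ppedin/Ontology-Induction | datasets/datasets_utils.py | _chunk_stream
-- ===== SOURCE A (Python) =====
-- from typing import Iterator, List, Union
--
-- def _chunk_stream(lines: Iterator[str], chunk_size: int) -> Iterator[str]:
--     """
--     """
--     buffer: list[str] = []
--     for line in lines:
--         buffer.extend(line.split())
--         while len(buffer) >= chunk_size:
--             yield " ".join(buffer[:chunk_size])
--             buffer = buffer[chunk_size:]
--     if buffer:
--         yield " ".join(buffer)
-- ===== SOURCE B (Python) =====
-- from typing import Iterator
--
-- def _chunk_stream(lines: Iterator[str], chunk_size: int) -> Iterator[str]: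
--     words = [w for line in lines for w in line.split()]
--     for i in range(0, len(words), chunk_size):
--         yield " ".join(words[i:i + chunk_size])
-- ===== Notes on version B (the rewrite author's own statement) =====
-- stated objective: alternative
-- what changed: B flattens the whole stream into one word list and emits chunks by a strided range of start indices into it, instead of A's incremental buffer that is slice-copied (compacted) after every emitted chunk.
-- outside the precondition, e.g. on _chunk_stream([], 0): A returns [], B raises ValueError
import Mathlib
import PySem

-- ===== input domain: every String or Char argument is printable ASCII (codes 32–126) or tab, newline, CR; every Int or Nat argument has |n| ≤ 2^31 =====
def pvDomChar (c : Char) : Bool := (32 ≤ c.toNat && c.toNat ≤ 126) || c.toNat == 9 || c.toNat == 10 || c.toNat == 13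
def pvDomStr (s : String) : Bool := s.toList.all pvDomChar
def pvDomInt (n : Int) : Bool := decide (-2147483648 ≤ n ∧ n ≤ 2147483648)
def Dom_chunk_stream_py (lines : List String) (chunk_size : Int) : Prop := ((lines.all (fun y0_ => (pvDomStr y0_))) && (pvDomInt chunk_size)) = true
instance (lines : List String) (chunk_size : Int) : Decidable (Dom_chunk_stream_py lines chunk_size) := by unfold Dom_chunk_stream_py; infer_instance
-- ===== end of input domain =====

-- B replaces A's incrementally compacted buffer (repeated slice-copy) by one flattened word
-- list chunked with a strided range over indices (measured no faster; a different algorithm).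


-- ===== PORT A =====
-- the inner 'while len(buffer) >= chunk_size' loop; fuel = buffer length (enough for chunk_size ≥ 1,
-- the only case admitted by Pre_; Python diverges for chunk_size ≤ 0 on nonempty input)
def pvDrainA (fuel : Nat) (cs : Int) (st : List String × List String) : List String × List String :=
  match fuel with
  | 0 => st
  | f + 1 =>
    if cs ≤ (st.2.length : Int) then
      pvDrainA f cs
        (st.1 ++ [PySem.Str.join " " (PySem.List.slice st.2 none (some cs))],
         PySem.List.slice st.2 (some cs) none)
    else st

def chunk_stream_py (lines : List String) (chunk_size : Int) : List String :=
  let st := lines.foldl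
    (fun st line =>
      let buf := st.2 ++ PySem.Str.split₀ line
      pvDrainA buf.length chunk_size (st.1, buf))
    ([], [])
  st.1 ++ (if st.2.isEmpty then [] else [PySem.Str.join " " st.2])

-- ===== PORT B =====
def chunk_stream_py_alt (lines : List String) (chunk_size : Int) : List String :=
  let words := lines.flatMap (fun line => PySem.Str.split₀ line)
  (PySem.List.pyRange 0 (words.length : Int) chunk_size).foldl
    (fun out i =>
      out ++ [PySem.Str.join " " (PySem.List.slice words (some i) (some (i + chunk_size)))])
    []

-- ===== PRECONDITION & SPEC =====
-- Pre_ excludes chunk_size < 1: there Python A loops forever on any input with a nonempty line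
-- list and returns [] only on lines = [], where B's range() raises (step 0) or yields nothing.
def Pre_chunk_stream_py (lines : List String) (chunk_size : Int) : Prop := 1 ≤ chunk_size
instance (lines : List String) (chunk_size : Int) : Decidable (Pre_chunk_stream_py lines chunk_size) := by unfold Pre_chunk_stream_py; infer_instance

def pvWitness_chunk_stream_py : List String × Int := (["a b c", "d"], 2)

def Spec_chunk_stream_py (lines : List String) (chunk_size : Int) (out : List String) : Prop := out = chunk_stream_py_alt lines chunk_size
instance (lines : List String) (chunk_size : Int) (out : List String) : Decidable (Spec_chunk_stream_py lines chunk_size out) := by unfold Spec_chunk_stream_py; infer_instance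

-- ===== CLAIM (what is proved, stated in full; the proofs are below) =====
def Claim_equal_chunk_stream_py : Prop := ∀ (lines : List String) (chunk_size : Int), Dom_chunk_stream_py lines chunk_size → Pre_chunk_stream_py lines chunk_size → Spec_chunk_stream_py lines chunk_size (chunk_stream_py lines chunk_size)

-- ===== LEMMAS AND PROOFS =====

-- the common reference value: the flattened word list cut into k-word chunks (last one partial)
def chunksOf (k : Nat) : List String → List String
  | [] => []
  | w :: ws => PySem.Str.join " " (List.take k (w :: ws)) :: chunksOf k (List.drop (k - 1) ws)
termination_by ws => ws.length
decreasing_by simp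

theorem chunksOf_nil (k : Nat) : chunksOf k [] = [] := by
  rw [chunksOf.eq_def]

theorem chunksOf_cons_eq (k : Nat) (hk : 1 ≤ k) (ws : List String) (h : ws ≠ []) :
    chunksOf k ws = PySem.Str.join " " (ws.take k) :: chunksOf k (ws.drop k) := by
  match ws with
  | w :: t =>
    have hd : (w :: t).drop k = t.drop (k - 1) := by
      obtain ⟨j, rfl⟩ := Nat.exists_eq_add_of_le hk
      have e : 1 + j = j + 1 := Nat.add_comm 1 j
      rw [e, List.drop_succ_cons]
      simp
    rw [chunksOf.eq_def, hd]

theorem chunksOf_small (k : Nat) (hk : 1 ≤ k) (ws : List String) (hlen : ws.length ≤ k) :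
    chunksOf k ws = if ws.isEmpty then [] else [PySem.Str.join " " ws] := by
  match ws with
  | [] => rw [chunksOf.eq_def]; rfl
  | w :: t =>
    rw [chunksOf.eq_def]
    have h1 : List.take k (w :: t) = w :: t := List.take_of_length_le hlen
    have h2 : List.drop (k - 1) t = [] := List.drop_of_length_le (by simp at hlen ⊢; omega)
    simp [h1, h2, chunksOf_nil]

theorem chunksOf_append_full (k : Nat) (hk : 1 ≤ k) (xs more : List String) (hlen : k ≤ xs.length) :
    chunksOf k (xs ++ more)
      = PySem.Str.join " " (xs.take k) :: chunksOf k (xs.drop k ++ more) := by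
  have hne : xs ++ more ≠ [] := by
    cases xs with
    | nil => simp at hlen; omega
    | cons a t => simp
  rw [chunksOf_cons_eq k hk _ hne]
  rw [List.take_append_of_le_length hlen, List.drop_append_of_le_length hlen]

theorem drain_spec (cs : Int) (hcs : 1 ≤ cs) :
    ∀ (fuel : Nat) (buf out more : List String), buf.length ≤ fuel →
      (pvDrainA fuel cs (out, buf)).1
          ++ chunksOf cs.toNat ((pvDrainA fuel cs (out, buf)).2 ++ more)
        = out ++ chunksOf cs.toNat (buf ++ more)
      ∧ (pvDrainA fuel cs (out, buf)).2.length < cs.toNat := by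
  intro fuel
  induction fuel with
  | zero =>
    intro buf out more h
    have hb : buf = [] := List.eq_nil_of_length_eq_zero (by omega)
    subst hb
    refine ⟨rfl, ?_⟩
    show (0 : Nat) < cs.toNat
    omega
  | succ f ih =>
    intro buf out more h
    by_cases hc : cs ≤ (buf.length : Int)
    · have hk : cs.toNat ≤ buf.length := by omega
      have hslice1 : PySem.List.slice buf none (some cs) = buf.take cs.toNat :=
        PySem.List.slice_to _ (by omega)
      have hslice2 : PySem.List.slice buf (some cs) none = buf.drop cs.toNat :=
        PySem.List.slice_from _ (by omega)
      have hstep : pvDrainA (f + 1) cs (out, buf)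
          = pvDrainA f cs (out ++ [PySem.Str.join " " (buf.take cs.toNat)], buf.drop cs.toNat) := by
        simp only [pvDrainA]
        rw [if_pos hc, hslice1, hslice2]
      obtain ⟨h1, h2⟩ := ih (buf.drop cs.toNat)
        (out ++ [PySem.Str.join " " (buf.take cs.toNat)]) more
        (by rw [List.length_drop]; omega)
      rw [hstep]
      refine ⟨?_, h2⟩
      rw [h1, chunksOf_append_full cs.toNat (by omega) buf more hk]
      simp
    · have hstep : pvDrainA (f + 1) cs (out, buf) = (out, buf) := by
        simp only [pvDrainA]
        rw [if_neg hc]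
      rw [hstep]
      refine ⟨rfl, ?_⟩
      show buf.length < cs.toNat
      omega

theorem fold_spec (cs : Int) (hcs : 1 ≤ cs) :
    ∀ (lines : List String) (out buf : List String), buf.length < cs.toNat →
      ((lines.foldl
          (fun st line =>
            let b := st.2 ++ PySem.Str.split₀ line
            pvDrainA b.length cs (st.1, b))
          (out, buf)).1
        ++ (if (lines.foldl
              (fun st line =>
                let b := st.2 ++ PySem.Str.split₀ line
                pvDrainA b.length cs (st.1, b))
              (out, buf)).2.isEmpty then []
            else [PySem.Str.join " "
              (lines.foldl
                (fun st line =>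
                  let b := st.2 ++ PySem.Str.split₀ line
                  pvDrainA b.length cs (st.1, b))
                (out, buf)).2]))
      = out ++ chunksOf cs.toNat (buf ++ lines.flatMap (fun line => PySem.Str.split₀ line)) := by
  intro lines
  induction lines with
  | nil =>
    intro out buf hlt
    simp [chunksOf_small cs.toNat (by omega) buf (by omega)]
  | cons line rest ih =>
    intro out buf hlt
    simp only [List.foldl_cons, List.flatMap_cons]
    obtain ⟨h1, h2⟩ := drain_spec cs hcs (buf ++ PySem.Str.split₀ line).length
      (buf ++ PySem.Str.split₀ line) out (rest.flatMap (fun line => PySem.Str.split₀ line))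
      (le_refl _)
    set st := pvDrainA (buf ++ PySem.Str.split₀ line).length cs (out, buf ++ PySem.Str.split₀ line)
      with hst
    have := ih st.1 st.2 h2
    simp only [Prod.mk.eta] at this ⊢
    rw [this, h1]
    simp

theorem pyRange_pos_cons (a b s : Int) (hs : 0 < s) (hab : a < b) :
    PySem.List.pyRange a b s = a :: PySem.List.pyRange (a + s) b s := by
  rw [PySem.List.pyRange_of_pos _ _ hs, PySem.List.pyRange_of_pos _ _ hs, if_pos hab]
  by_cases h2 : a + s < b
  · rw [if_pos h2]
    have e1 : (b - a + s - 1) / s = (b - (a + s) + s - 1) / s + 1 := by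
      have e : b - a + s - 1 = (b - (a + s) + s - 1) + 1 * s := by ring
      rw [e, Int.add_mul_ediv_right _ _ (by omega)]
    have hq : 0 ≤ (b - (a + s) + s - 1) / s := Int.ediv_nonneg (by omega) (by omega)
    have e2 : ((b - a + s - 1) / s).toNat = ((b - (a + s) + s - 1) / s).toNat + 1 := by
      rw [e1]; omega
    rw [e2, List.range_succ_eq_map]
    simp only [List.map_cons, List.map_map]
    refine List.cons_eq_cons.mpr ⟨by simp, ?_⟩
    refine List.map_congr_left fun k _ => ?_
    simp only [Function.comp_apply]
    push_cast
    ring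
  · rw [if_neg h2]
    have e1 : (b - a + s - 1) / s = 1 := by
      have e : b - a + s - 1 = (b - a - 1) + 1 * s := by ring
      rw [e, Int.add_mul_ediv_right _ _ (by omega),
        Int.ediv_eq_zero_of_lt (by omega) (by omega)]
      omega
    rw [e1]
    simp

theorem bloop_spec (cs : Int) (hcs : 1 ≤ cs) (words : List String) :
    ∀ (m : Nat) (i : Int) (acc : List String), 0 ≤ i → ((words.length : Int) - i).toNat ≤ m →
      (PySem.List.pyRange i (words.length : Int) cs).foldl
        (fun out j =>
          out ++ [PySem.Str.join " " (PySem.List.slice words (some j) (some (j + cs)))])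
        acc
      = acc ++ chunksOf cs.toNat (words.drop i.toNat) := by
  intro m
  induction m with
  | zero =>
    intro i acc hi hm
    have hge : (words.length : Int) ≤ i := by omega
    rw [PySem.List.pyRange_of_pos _ _ (by omega), if_neg (by omega)]
    rw [List.drop_of_length_le (by omega), chunksOf.eq_def]
    simp
  | succ m ih =>
    intro i acc hi hm
    by_cases hib : i < (words.length : Int)
    · rw [pyRange_pos_cons i _ cs (by omega) hib]
      simp only [List.foldl_cons]
      have hslice : PySem.List.slice words (some i) (some (i + cs))
          = (words.drop i.toNat).take cs.toNat := by
        rw [PySem.List.slice_toNat _ hi (by omega)]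
        congr 1
        omega
      rw [hslice, ih (i + cs) (acc ++ [PySem.Str.join " " ((words.drop i.toNat).take cs.toNat)])
        (by omega) (by omega)]
      have hdd : words.drop (i + cs).toNat = (words.drop i.toNat).drop cs.toNat := by
        rw [List.drop_drop]
        congr 1
        omega
      rw [hdd, chunksOf_cons_eq cs.toNat (by omega) (words.drop i.toNat)
        (by intro h; have := congrArg List.length h; simp at this; omega)]
      simp
    · rw [PySem.List.pyRange_of_pos _ _ (by omega), if_neg (by omega)]
      rw [List.drop_of_length_le (by omega)]
      simp [chunksOf]

-- ===== VERDICT (by name: the statement is the Claim_ definition above) =====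
theorem chunk_stream_py_spec : Claim_equal_chunk_stream_py := by
  intro lines cs _ hpre
  unfold Spec_chunk_stream_py
  have hcs : 1 ≤ cs := hpre
  unfold chunk_stream_py chunk_stream_py_alt
  rw [fold_spec cs hcs lines [] [] (by simp; omega)]
  rw [bloop_spec cs hcs (lines.flatMap (fun line => PySem.Str.split₀ line)) 
    (lines.flatMap (fun line => PySem.Str.split₀ line)).length 0 [] (by omega) (by omega)]
  simp
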